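-- pv_equiv track=rewrite | github.com/abeyer/adventofcode2015 | 01/aoc01.py | reaches_floor
-- ===== SOURCE A (Python) =====
-- def values(s):
--     """Return a list of floor deltas from an instruction string
--
--     Return a list of (1,-1) values, where 1 means go up one floor and -1
--     means go down one floor, from an instruction string of '(' and ')'.
--     All other characters in the input string are ignored.
--
--     >>> values('(')
--     [1]
--     >>> values(')')
--     [-1]
--     >>> values(')(')
--     [-1, 1]
--     >>> values('')
--     []
--     >>> values(' (asdf) ')
--     [1, -1]
--     >>> values('asdf')
--     []
--     """
--     return [1 if c=='(' else -1 for c in s if c in '()']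
--
-- def reaches_floor(s, f, start=0):
--     """Return the one-based index of the instruction that reaches a floor
--
--     If an instruction string `s` would result in reaching a given floor, `f`,
--     return the one-based index of the first instruction that would do so.
--     Return -1 if the instructions never reach the floor, and 0 if the
--     destination floor is the same as the starting floor.
--
--     Optionally provide a starting floor `start`.
--
--     For example:
--         ) causes him to enter the basement at character position 1.
--     >>> reaches_floor(')', -1)
--     1
--
--         ()()) causes him to enter the basement at character position 5.
--     >>> reaches_floor('()())', -1)
--     5
--
--     >>> reaches_floor('', 0)
--     0
--     >>> reaches_floor('()()()', 0)
--     0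
--     >>> reaches_floor(')()(()(', 1)
--     5
--     >>> reaches_floor(')()(()(', 4)
--     -1
--     """
--     if f == start:
--         return 0
--     for (i,v) in enumerate(values(s)):
--         start += v
--         if start == f:
--             return i+1 # needs to be one-indexed, not zero
--     return -1
-- ===== SOURCE B (Python) =====
-- def reaches_floor(s, f, start=0):
--     if f == start:
--         return 0
--     floors = []
--     total = start
--     for c in s:
--         if c == '(':
--             total += 1
--         elif c == ')':
--             total -= 1
--         else:
--             continue
--         floors.append(total)
--     return floors.index(f) + 1 if f in floors else -1
-- ===== Notes on version B (the rewrite author's own statement) =====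
-- stated objective: alternative
-- what changed: B materializes the full prefix-sum table of floors in one char-level pass (no values() helper, no early return), then finds the answer with a separate membership test and list.index search, instead of A's filtered-delta list driven through an enumerate loop with a scalar accumulator and early return.
import Mathlib
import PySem

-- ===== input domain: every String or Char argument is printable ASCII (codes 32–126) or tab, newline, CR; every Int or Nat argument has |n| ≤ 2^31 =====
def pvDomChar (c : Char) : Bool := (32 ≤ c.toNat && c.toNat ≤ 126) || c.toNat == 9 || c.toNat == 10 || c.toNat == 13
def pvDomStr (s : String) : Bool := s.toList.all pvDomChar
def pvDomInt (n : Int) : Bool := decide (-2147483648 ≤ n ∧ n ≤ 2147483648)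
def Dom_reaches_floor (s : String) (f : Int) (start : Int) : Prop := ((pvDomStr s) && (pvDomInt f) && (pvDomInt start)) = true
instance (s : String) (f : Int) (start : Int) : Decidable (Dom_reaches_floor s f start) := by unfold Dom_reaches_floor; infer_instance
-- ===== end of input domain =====

-- B materializes the full prefix-sum table of floors in one char-level pass, then searches it
-- with membership + list.index, instead of A's enumerate loop with a scalar accumulator and
-- early return (objective: alternative decomposition, same O(n) cost).


-- ===== PORT A =====
-- values(s): [1 if c=='(' else -1 for c in s if c in '()']
def pvValuesA (s : String) : List Int :=
  (s.toList.filter (fun c => c == '(' || c == ')')).map (fun c => if c == '(' then (1 : Int) else -1)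

-- the for-loop over enumerate(values(s)) with early return
def pvLoopA : List (Int × Int) → Int → Int → Int
  | [], _, _ => -1
  | (i, v) :: rest, start, f =>
    let start' := start + v
    if start' = f then i + 1 else pvLoopA rest start' f

def reaches_floor (s : String) (f : Int) (start : Int) : Int :=
  if f = start then 0
  else pvLoopA (PySem.List.enumerate (pvValuesA s) 0) start f

-- ===== PORT B =====
-- one char-level pass appending each running total to the floors table
def pvFloorsB : List Char → Int → List Int
  | [], _ => []
  | c :: rest, total =>
    if c = '(' then (total + 1) :: pvFloorsB rest (total + 1)
    else if c = ')' then (total - 1) :: pvFloorsB rest (total - 1)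
    else pvFloorsB rest total

def reaches_floor_alt (s : String) (f : Int) (start : Int) : Int :=
  if f = start then 0
  else if f ∈ pvFloorsB s.toList start then
    ((PySem.List.index? (pvFloorsB s.toList start) f).getD 0 : Int) + 1
  else -1

-- ===== PRECONDITION & SPEC =====
def Spec_reaches_floor (s : String) (f : Int) (start : Int) (out : Int) : Prop := out = reaches_floor_alt s f start
instance (s : String) (f : Int) (start : Int) (out : Int) : Decidable (Spec_reaches_floor s f start out) := by unfold Spec_reaches_floor; infer_instance

-- ===== CLAIM (what is proved, stated in full; the proofs are below) =====
def Claim_equal_reaches_floor : Prop := ∀ (s : String) (f : Int) (start : Int), Dom_reaches_floor s f start → Spec_reaches_floor s f start (reaches_floor s f start)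

-- ===== LEMMAS AND PROOFS =====

-- proof helper: the running sums of a delta list (B's table specialized to deltas)
def pvFloorsB' : List Int → Int → List Int
  | [], _ => []
  | d :: r, a => (a + d) :: pvFloorsB' r (a + d)

-- B's floors table equals the running sums of A's delta list
lemma pvFloorsB_eq_deltas (cs : List Char) : ∀ (t : Int),
    pvFloorsB cs t =
      pvFloorsB' ((cs.filter (fun c => c == '(' || c == ')')).map (fun c => if c == '(' then (1 : Int) else -1)) t := by
  induction cs with
  | nil => intro t; rfl
  | cons c rest ih =>
    intro t
    by_cases h1 : c = '('
    · simp [pvFloorsB, pvFloorsB', h1, ih]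
    · by_cases h2 : c = ')'
      · simp [pvFloorsB, pvFloorsB', h2, ih, sub_eq_add_neg]
      · simp [pvFloorsB, h1, h2, ih]

-- A's early-return loop computed as a search in the running-sums table
lemma pvLoopA_eq_index (l : List Int) : ∀ (i start f : Int),
    pvLoopA (PySem.List.enumerate l i) start f =
      match PySem.List.index? (pvFloorsB' l start) f with
      | some j => i + (j : Int) + 1
      | none => -1 := by
  induction l with
  | nil => intro i start f; rfl
  | cons d r ih =>
    intro i start f
    rw [PySem.List.enumerate_cons]
    simp only [pvLoopA, pvFloorsB']
    by_cases h : start + d = f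
    · rw [if_pos h, h, PySem.List.index?_cons_self]
      simp
    · rw [if_neg h, ih (i + 1)]
      have hcons : PySem.List.index? ((start + d) :: pvFloorsB' r (start + d)) f =
          (PySem.List.index? (pvFloorsB' r (start + d)) f).map (· + 1) :=
        PySem.List.index?_cons_of_ne _ h
      rw [hcons]
      cases hidx : PySem.List.index? (pvFloorsB' r (start + d)) f with
      | none => rfl
      | some j => simp only [Option.map_some]; push_cast; ring

-- ===== VERDICT (by name: the statement is the Claim_ definition above) =====
theorem reaches_floor_spec : Claim_equal_reaches_floor := by
  intro s f start _
  unfold Spec_reaches_floor reaches_floor reaches_floor_alt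
  by_cases h0 : f = start
  · simp [h0]
  · rw [if_neg h0, if_neg h0]
    have hfl : pvFloorsB s.toList start = pvFloorsB' (pvValuesA s) start :=
      pvFloorsB_eq_deltas s.toList start
    rw [hfl, pvLoopA_eq_index (pvValuesA s) 0 start f]
    cases hidx : PySem.List.index? (pvFloorsB' (pvValuesA s) start) f with
    | none =>
      have hmem : f ∉ pvFloorsB' (pvValuesA s) start := (PySem.List.index?_eq_none_iff _ _).mp hidx
      rw [if_neg hmem]
    | some j =>
      have hmem : f ∈ pvFloorsB' (pvValuesA s) start :=
        (PySem.List.index?_isSome_iff _ _).mp (by rw [hidx]; rfl)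
      rw [if_pos hmem]
      simp
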